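-- pv_equiv track=rewrite | github.com/kathrynpotten/AdventOfCode2022 | scripts/07_No_Space_Left_On_Device.py | find_listings
-- ===== SOURCE A (Python) =====
-- def find_listings(lines):
--     """ takes in lines from terminal output and finds the start of a listing,
--      returns the lines of that listing and the name of the outer directory """
--     listings = {}
--     listing = False
--     for line_number, line in enumerate(lines):
--         while not listing:
--             if line == '$ ls':
--                 directory = lines[line_number-1][5:]
--                 listings[directory] = line_number+1
--                 listing = True
--             break
--         while listing:
--             if line[:4] == '$ cd':
--                 listings[directory] = [listings[directory],line_number]
--                 listing = False
--             elif line_number == len(lines)-1: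
--                 listings[directory] = [listings[directory],line_number+1]
--                 listing = False
--             break
--
--     return listings
-- ===== SOURCE B (Python) =====
-- def find_listings(lines):
--     """ takes in lines from terminal output and finds the start of a listing,
--      returns the lines of that listing and the name of the outer directory """
--     listings = {}
--     n = len(lines)
--     i = 0
--     while i < n:
--         if lines[i] == '$ ls':
--             j = i + 1
--             while j < n and lines[j][:4] != '$ cd':
--                 j += 1
--             listings[lines[i - 1][5:]] = [i + 1, j]
--             i = j + 1
--         else:
--             i += 1
--     return listings
-- ===== Notes on version B (the rewrite author's own statement) =====
-- stated objective: simpler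
-- what changed: The boolean listing-state machine folded over enumerate(lines) is replaced by a plain index-driven outer scan that, at each '$ ls', runs an inner scan for the next '$ cd' (or end of input) and records the [start, end] pair in one assignment, resuming after the closing line; the dict never holds a temporary int value.
import Mathlib
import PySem

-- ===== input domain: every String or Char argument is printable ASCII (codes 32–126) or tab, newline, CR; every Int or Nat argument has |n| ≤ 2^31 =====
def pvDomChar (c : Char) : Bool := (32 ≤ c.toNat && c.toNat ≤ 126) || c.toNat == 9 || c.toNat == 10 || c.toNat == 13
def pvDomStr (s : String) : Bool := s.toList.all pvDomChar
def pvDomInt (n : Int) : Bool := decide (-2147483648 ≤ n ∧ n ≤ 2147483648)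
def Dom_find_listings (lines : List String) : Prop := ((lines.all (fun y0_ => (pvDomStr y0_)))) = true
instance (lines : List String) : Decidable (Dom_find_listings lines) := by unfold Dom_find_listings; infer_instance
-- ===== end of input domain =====

-- B replaces A's boolean listing-state machine by an index-driven outer scan with an inner scan
-- for the closing '$ cd' line (objective: simpler; same return value on every input).

-- ===== PORT A =====
-- Python's dict value is first an int (the start line of an open listing) and later replaced by a
-- two-element list [start, end]; the heterogeneous value is modelled by a sum type and decoded at
-- return.  The .inl branch of the decoder is unreachable: every opened listing is closed, by the
-- '$ cd' branch or by the last-line branch, before the function returns.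
def pvDecodeVal (v : Int ⊕ List Int) : List Int :=
  match v with
  | .inl s => [s]
  | .inr l => l

-- reading listings[directory] at close time: always some (.inl start); the other branches are
-- unreachable defaults (Python would have raised KeyError there)
def pvStartVal (v? : Option (Int ⊕ List Int)) : Int :=
  match v? with
  | some (.inl s) => s
  | some (.inr l) => l.headD 0
  | none => 0

-- the body of A's for-loop: first the 'while not listing: … break' block, then 'while listing: … break'
def pvStepA (lines : List String) (st : PySem.Dict String (Int ⊕ List Int) × Bool × String)
    (p : Int × String) : PySem.Dict String (Int ⊕ List Int) × Bool × String :=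
  let line_number := p.1
  let line := p.2
  let st1 : PySem.Dict String (Int ⊕ List Int) × Bool × String :=
    if st.2.1 = false then
      if line = "$ ls" then
        -- lines[line_number-1][5:] ; the index is always in range (Python wraps -1 to the last
        -- element and the list is nonempty while iterating), so the .getD default is unreachable
        let directory := PySem.Str.slice ((PySem.List.pyGet? lines (line_number - 1)).getD "") (some 5) none
        (st.1.insert directory (.inl (line_number + 1)), true, directory)
      else st
    else st
  if st1.2.1 = true then
    if PySem.Str.slice line none (some 4) = "$ cd" then
      (st1.1.insert st1.2.2 (.inr [pvStartVal (st1.1.get? st1.2.2), line_number]), false, st1.2.2)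
    else if line_number = (lines.length : Int) - 1 then
      (st1.1.insert st1.2.2 (.inr [pvStartVal (st1.1.get? st1.2.2), line_number + 1]), false, st1.2.2)
    else st1
  else st1

def find_listings (lines : List String) : List (String × List Int) :=
  (((PySem.List.enumerate lines 0).foldl (pvStepA lines)
      (PySem.Dict.empty, false, "")).1.items).map (fun kv => (kv.1, pvDecodeVal kv.2))

-- ===== PORT B =====
-- inner scan of Source B: first index j' ≥ j with lines[j'][:4] == '$ cd', else len(lines)
def pvInnerB (lines : List String) (j : Nat) : Nat :=
  if h : j < lines.length then
    if PySem.Str.slice lines[j] none (some 4) = "$ cd" then j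
    else pvInnerB lines (j + 1)
  else j
termination_by lines.length - j

theorem pvInnerB_ge (lines : List String) (j : Nat) : j ≤ pvInnerB lines j := by
  fun_induction pvInnerB <;> omega

-- outer scan of Source B
def pvOuterB (lines : List String) (listings : PySem.Dict String (List Int)) (i : Nat) :
    PySem.Dict String (List Int) :=
  if h : i < lines.length then
    if lines[i] = "$ ls" then
      let j := pvInnerB lines (i + 1)
      pvOuterB lines
        (listings.insert
          (PySem.Str.slice ((PySem.List.pyGet? lines ((i : Int) - 1)).getD "") (some 5) none)
          [(i : Int) + 1, (j : Int)]) (j + 1)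
    else pvOuterB lines listings (i + 1)
  else listings
termination_by lines.length - i
decreasing_by
  · have := pvInnerB_ge lines (i + 1); omega
  · omega

def find_listings_alt (lines : List String) : List (String × List Int) :=
  (pvOuterB lines PySem.Dict.empty 0).items

-- ===== PRECONDITION & SPEC =====
def Spec_find_listings (lines : List String) (out : List (String × List Int)) : Prop := out = find_listings_alt lines
instance (lines : List String) (out : List (String × List Int)) : Decidable (Spec_find_listings lines out) := by unfold Spec_find_listings; infer_instance

-- ===== CLAIM (what is proved, stated in full; the proofs are below) =====
def Claim_equal_find_listings : Prop := ∀ (lines : List String), Dom_find_listings lines → Spec_find_listings lines (find_listings lines)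

-- ===== LEMMAS AND PROOFS =====

-- A's fold restricted to the suffix of the enumeration starting at index i
def pvGA (lines : List String) (i : Nat)
    (st : PySem.Dict String (Int ⊕ List Int) × Bool × String) :
    PySem.Dict String (Int ⊕ List Int) × Bool × String :=
  (PySem.List.enumerate (lines.drop i) (i : Int)).foldl (pvStepA lines) st

-- decoding A's heterogeneous dict into B's dict of pairs
def pvDecL (d : PySem.Dict String (Int ⊕ List Int)) : List (String × List Int) :=
  d.items.map (fun kv => (kv.1, pvDecodeVal kv.2))

def pvDecD (d : PySem.Dict String (Int ⊕ List Int)) : PySem.Dict String (List Int) :=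
  PySem.Dict.mk (pvDecL d)

theorem pvGA_stop (lines : List String) (i : Nat) (h : lines.length ≤ i) (st) :
    pvGA lines i st = st := by
  simp [pvGA, List.drop_eq_nil_of_le h]

theorem pvGA_step (lines : List String) (i : Nat) (h : i < lines.length) (st) :
    pvGA lines i st = pvGA lines (i + 1) (pvStepA lines st ((i : Int), lines[i])) := by
  simp only [pvGA, List.drop_eq_getElem_cons h, PySem.List.enumerate_cons, List.foldl_cons]
  norm_num

-- decoding commutes with insertion (the decoded key is the key itself)
theorem pvDecD_insert (d : PySem.Dict String (Int ⊕ List Int)) (k : String) (v : Int ⊕ List Int) :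
    pvDecD (d.insert k v) = (pvDecD d).insert k (pvDecodeVal v) := by
  have hc : (pvDecD d).contains k = d.contains k := by
    simp only [pvDecD, pvDecL, PySem.Dict.contains, List.any_map]
    rfl
  apply PySem.Dict.ext
  rw [show (pvDecD (d.insert k v)).items
      = ((d.insert k v).items).map (fun kv => (kv.1, pvDecodeVal kv.2)) from rfl]
  rw [PySem.Dict.items_insert, PySem.Dict.items_insert, hc]
  by_cases h : d.contains k = true
  · simp only [h, if_true, pvDecD, pvDecL, List.map_map]
    apply List.map_congr_left
    intro p _
    by_cases hp : p.1 = k <;> simp [hp]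
  · simp [h, pvDecD, pvDecL]

theorem pvDecL_eq_items (d : PySem.Dict String (Int ⊕ List Int)) :
    pvDecL d = (pvDecD d).items := rfl

-- the main invariant, by induction on the number of remaining lines:
-- (closed state) A's fold from i with listing = False equals B's outer scan from i, and
-- (open state)  A's fold from i with listing = True and an open entry d ↦ start equals B's outer
--               scan resumed after the close found by the inner scan from i.
theorem pvMain (lines : List String) (k : Nat) :
    ∀ i, lines.length ≤ i + k →
      ((∀ mA d, pvDecL (pvGA lines i (mA, false, d)).1 = (pvOuterB lines (pvDecD mA) i).items)
       ∧ (∀ mA d s, i < lines.length → mA.get? d = some (.inl s) →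
            pvDecL (pvGA lines i (mA, true, d)).1 =
              (pvOuterB lines ((pvDecD mA).insert d [s, (pvInnerB lines i : Int)])
                (pvInnerB lines i + 1)).items)) := by
  induction k with
  | zero =>
    intro i hi
    constructor
    · intro mA d
      rw [pvGA_stop lines i (by omega), pvOuterB]
      simp [pvDecD, show ¬ i < lines.length by omega]
    · intro mA d s hi' _; omega
  | succ k ih =>
    intro i hi
    by_cases hlt : i < lines.length
    · have ihC := (ih (i + 1) (by omega)).1
      have ihO := (ih (i + 1) (by omega)).2
      constructor
      · -- closed state
        intro mA d
        rw [pvGA_step lines i hlt]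
        by_cases hls : lines[i] = "$ ls"
        · have hcd' : ¬ (PySem.Str.slice "$ ls" none (some 4) = "$ cd") := by decide
          by_cases hlast : (i : Int) = (lines.length : Int) - 1
          · -- '$ ls' on the last line: closes immediately with [i+1, i+1]
            have e : pvStepA lines (mA, false, d) ((i : Int), lines[i]) =
                ((mA.insert (PySem.Str.slice ((PySem.List.pyGet? lines ((i : Int) - 1)).getD "") (some 5) none) (.inl ((i : Int) + 1))).insert
                   (PySem.Str.slice ((PySem.List.pyGet? lines ((i : Int) - 1)).getD "") (some 5) none)
                   (.inr [(i : Int) + 1, (i : Int) + 1]), false,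
                 PySem.Str.slice ((PySem.List.pyGet? lines ((i : Int) - 1)).getD "") (some 5) none) := by
              simp [pvStepA, hls, hcd', hlast, PySem.Dict.get?_insert_self, pvStartVal]
            rw [e, pvGA_stop lines (i + 1) (by omega)]
            rw [show (((mA.insert _ (Sum.inl ((i : Int) + 1))).insert _ (Sum.inr [(i : Int) + 1, (i : Int) + 1]), false,
                 PySem.Str.slice ((PySem.List.pyGet? lines ((i : Int) - 1)).getD "") (some 5) none) :
                 PySem.Dict String (Int ⊕ List Int) × Bool × String).1 =
                (mA.insert (PySem.Str.slice ((PySem.List.pyGet? lines ((i : Int) - 1)).getD "") (some 5) none) (Sum.inl ((i : Int) + 1))).insert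
                  (PySem.Str.slice ((PySem.List.pyGet? lines ((i : Int) - 1)).getD "") (some 5) none) (Sum.inr [(i : Int) + 1, (i : Int) + 1]) from rfl]
            rw [PySem.Dict.insert_insert_self, pvDecL_eq_items, pvDecD_insert]
            conv_rhs => rw [pvOuterB]
            have hj : pvInnerB lines (i + 1) = i + 1 := by
              rw [pvInnerB]; simp [show ¬ i + 1 < lines.length by omega]
            simp only [dif_pos hlt, if_pos hls, hj]
            conv_rhs => rw [pvOuterB]
            simp only [dif_neg (show ¬ i + 1 + 1 < lines.length by omega)]
            show ((pvDecD mA).insert _ (pvDecodeVal (Sum.inr [(i:Int)+1, (i:Int)+1]))).items = _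
            norm_cast
          · -- '$ ls' not on the last line: stays open, use the open-state IH at i+1
            have e : pvStepA lines (mA, false, d) ((i : Int), lines[i]) =
                (mA.insert (PySem.Str.slice ((PySem.List.pyGet? lines ((i : Int) - 1)).getD "") (some 5) none) (.inl ((i : Int) + 1)), true,
                 PySem.Str.slice ((PySem.List.pyGet? lines ((i : Int) - 1)).getD "") (some 5) none) := by
              simp [pvStepA, hls, hcd', hlast]
            rw [e]
            rw [ihO _ _ ((i : Int) + 1) (by omega) (PySem.Dict.get?_insert_self _ _ _)]
            rw [pvDecD_insert]
            show (pvOuterB lines (((pvDecD mA).insert _ [(i:Int)+1]).insert _ _) _).items = _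
            rw [PySem.Dict.insert_insert_self]
            conv_rhs => rw [pvOuterB]
            simp only [dif_pos hlt, if_pos hls]
        · -- not '$ ls': nothing happens
          have e : pvStepA lines (mA, false, d) ((i : Int), lines[i]) = (mA, false, d) := by
            simp [pvStepA, hls]
          rw [e, ihC mA d]
          conv_rhs => rw [pvOuterB]
          simp only [dif_pos hlt, if_neg hls]
      · -- open state
        intro mA d s hi' hget
        rw [pvGA_step lines i hlt]
        by_cases hcd : PySem.Str.slice lines[i] none (some 4) = "$ cd"
        · -- closing '$ cd' line: record [s, i] and return to the closed scan at i+1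
          have e : pvStepA lines (mA, true, d) ((i : Int), lines[i]) =
              (mA.insert d (.inr [s, (i : Int)]), false, d) := by
            simp [pvStepA, hcd, hget, pvStartVal]
          rw [e, ihC _ d, pvDecD_insert]
          have hj : pvInnerB lines i = i := by rw [pvInnerB]; simp [hlt, hcd]
          rw [hj]
          rfl
        · have hj : pvInnerB lines i = pvInnerB lines (i + 1) := by
            rw [pvInnerB]; simp [hlt, hcd]
          by_cases hlast : (i : Int) = (lines.length : Int) - 1
          · -- last line while open: record [s, len(lines)]
            have e : pvStepA lines (mA, true, d) ((i : Int), lines[i]) =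
                (mA.insert d (.inr [s, (i : Int) + 1]), false, d) := by
              simp [pvStepA, hcd, hlast, hget, pvStartVal]
            rw [e, pvGA_stop lines (i + 1) (by omega)]
            have hjn : pvInnerB lines (i + 1) = i + 1 := by
              rw [pvInnerB]; simp [show ¬ i + 1 < lines.length by omega]
            rw [hj, hjn]
            conv_rhs => rw [pvOuterB]
            simp only [dif_neg (show ¬ i + 1 + 1 < lines.length by omega)]
            show pvDecL (mA.insert d (Sum.inr [s, (i:Int)+1])) = _
            rw [pvDecL_eq_items, pvDecD_insert]
            show ((pvDecD mA).insert d (pvDecodeVal (Sum.inr [s, (i:Int)+1]))).items = _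
            norm_cast
          · -- ordinary line inside an open listing: ignored
            have e : pvStepA lines (mA, true, d) ((i : Int), lines[i]) = (mA, true, d) := by
              simp [pvStepA, hcd, hlast]
            rw [e, ihO mA d s (by omega) hget, hj]
    · constructor
      · intro mA d
        rw [pvGA_stop lines i (by omega), pvOuterB]
        simp [pvDecD, show ¬ i < lines.length by omega]
      · intro mA d s hi' _; omega

-- ===== VERDICT (by name: the statement is the Claim_ definition above) =====
theorem find_listings_spec : Claim_equal_find_listings := by
  intro lines _
  show find_listings lines = find_listings_alt lines
  have h := (pvMain lines lines.length 0 (by omega)).1 PySem.Dict.empty ""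
  have h0 : pvGA lines 0 (PySem.Dict.empty, false, "")
      = (PySem.List.enumerate lines 0).foldl (pvStepA lines) (PySem.Dict.empty, false, "") := by
    simp [pvGA]
  rw [h0] at h
  simpa [find_listings, find_listings_alt, pvDecL, pvDecD, PySem.Dict.empty] using h
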